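-- pv_equiv track=rewrite | github.com/shurrey/illuminate-mcp-opensource | src/illuminate_mcp/planner.py | _best_id_column
-- ===== SOURCE A (Python) =====
-- from typing import Dict, List, Sequence, Set, Tuple
--
-- def _best_id_column(entity_name: str, columns: Sequence[str]) -> str | None:
--     normalized_columns = set(columns)
--     if "ID" in normalized_columns:
--         return "ID"
--
--     entity_token = entity_name.upper().split("_")[0]
--     entity_id = f"{entity_token}_ID"
--     if entity_id in normalized_columns:
--         return entity_id
--
--     preferred = ("COURSE_ID", "USER_ID", "SECTION_ID", "INSTANCE_ID", "SOURCE_ID", "TERM_ID")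
--     for col in preferred:
--         if col in normalized_columns:
--             return col
--
--     for col in columns:
--         if col.endswith("_ID"):
--             return col
--     return None
-- ===== SOURCE B (Python) =====
-- def _best_id_column(entity_name, columns):
--     entity_id = entity_name.upper().split("_")[0] + "_ID"
--     preferred = ("COURSE_ID", "USER_ID", "SECTION_ID", "INSTANCE_ID", "SOURCE_ID", "TERM_ID")
--     best = None  # (rank, index, column)
--     for i, col in enumerate(columns):
--         if col == "ID":
--             rank = 0
--         elif col == entity_id:
--             rank = 1
--         elif col in preferred:
--             rank = 2 + preferred.index(col)
--         elif col.endswith("_ID"):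
--             rank = 8
--         else:
--             continue
--         if best is None or (rank, i) < (best[0], best[1]):
--             best = (rank, i, col)
--     return best[2] if best is not None else None
-- ===== Notes on version B (the rewrite author's own statement) =====
-- stated objective: alternative
-- what changed: Replaces A's cascade of four separate membership passes (set lookups plus two scans) with a single pass over columns that assigns each column a priority rank and keeps the (rank, index)-lexicographically minimal candidate.
import Mathlib
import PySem

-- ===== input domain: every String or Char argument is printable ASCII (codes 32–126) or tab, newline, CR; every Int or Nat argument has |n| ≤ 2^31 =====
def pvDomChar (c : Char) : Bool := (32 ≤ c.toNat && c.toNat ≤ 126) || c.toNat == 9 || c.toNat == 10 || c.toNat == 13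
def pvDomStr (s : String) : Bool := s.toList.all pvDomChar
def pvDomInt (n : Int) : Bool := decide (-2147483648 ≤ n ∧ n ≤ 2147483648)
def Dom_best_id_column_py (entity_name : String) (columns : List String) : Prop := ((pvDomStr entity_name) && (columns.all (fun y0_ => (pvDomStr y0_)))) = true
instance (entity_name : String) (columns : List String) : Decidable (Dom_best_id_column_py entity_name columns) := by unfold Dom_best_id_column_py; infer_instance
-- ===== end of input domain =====

-- B replaces A's cascade of four membership passes by ONE pass keeping the (rank, index)-minimal candidate (objective: alternative, same cost).

-- shared by both ports: entity_name.upper().split("_")[0] + "_ID"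
-- (split with a nonempty separator never returns an empty list, so [0] = headD ""; exact)
def pvEntityId (entity_name : String) : String :=
  (((PySem.Str.split? (PySem.Str.upper entity_name) "_").getD []).headD "") ++ "_ID"

def pvPreferred : List String :=
  ["COURSE_ID", "USER_ID", "SECTION_ID", "INSTANCE_ID", "SOURCE_ID", "TERM_ID"]

-- ===== PORT A =====
def best_id_column_py (entity_name : String) (columns : List String) : Option String :=
  let normalized_columns := PySem.Set.ofList columns
  if PySem.Set.contains normalized_columns "ID" then some "ID"
  else
    let entity_id := pvEntityId entity_name
    if PySem.Set.contains normalized_columns entity_id then some entity_id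
    else
      match pvPreferred.find? (fun col => PySem.Set.contains normalized_columns col) with
      | some col => some col
      | none =>
        match columns.find? (fun col => PySem.Str.endswith col "_ID") with
        | some col => some col
        | none => none

-- ===== PORT B =====
-- rank of a column: 0 = "ID", 1 = entity id, 2+j = preferred[j], 8 = other "_ID" suffix, none = not a candidate
-- ('col in preferred' followed by 'preferred.index(col)' is ported as one match on index?)
def pvRank? (entity_id c : String) : Option Nat :=
  if c = "ID" then some 0
  else if c = entity_id then some 1
  else
    match PySem.List.index? pvPreferred c with
    | some j => some (2 + j)
    | none => if PySem.Str.endswith c "_ID" then some 8 else none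

def best_id_column_py_alt (entity_name : String) (columns : List String) : Option String :=
  let entity_id := pvEntityId entity_name
  let best := (PySem.List.enumerate columns).foldl
    (fun best p =>
      match pvRank? entity_id p.2 with
      | none => best
      | some r =>
        match best with
        | none => some (r, p.1, p.2)
        | some b => if r < b.1 ∨ (r = b.1 ∧ p.1 < b.2.1) then some (r, p.1, p.2) else some b)
    none
  best.map (fun b => b.2.2)

-- ===== PRECONDITION & SPEC =====
def Spec_best_id_column_py (entity_name : String) (columns : List String) (out : Option String) : Prop := out = best_id_column_py_alt entity_name columns
instance (entity_name : String) (columns : List String) (out : Option String) : Decidable (Spec_best_id_column_py entity_name columns out) := by unfold Spec_best_id_column_py; infer_instance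

-- ===== CLAIM (what is proved, stated in full; the proofs are below) =====
def Claim_equal_best_id_column_py : Prop := ∀ (entity_name : String) (columns : List String), Dom_best_id_column_py entity_name columns → Spec_best_id_column_py entity_name columns (best_id_column_py entity_name columns)

-- ===== LEMMAS AND PROOFS =====

-- strict lexicographic order on (rank, index) keys
def pvLtk (u t : Nat × Int × String) : Prop :=
  u.1 < t.1 ∨ (u.1 = t.1 ∧ u.2.1 < t.2.1)

-- B's loop body, restricted to actual candidates
def pvStep (b : Option (Nat × Int × String)) (t : Nat × Int × String) : Option (Nat × Int × String) :=
  match b with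
  | none => some t
  | some bb => if t.1 < bb.1 ∨ (t.1 = bb.1 ∧ t.2.1 < bb.2.1) then some t else some bb

-- the candidate list: (rank, index, column) for every ranked column
def pvCands (eid : String) (cols : List String) : List (Nat × Int × String) :=
  (PySem.List.enumerate cols).filterMap
    (fun p => (pvRank? eid p.2).map (fun r => (r, p.1, p.2)))

lemma pvLtk_asymm {u t : Nat × Int × String} (h : pvLtk u t) : ¬ pvLtk t u := by
  obtain ⟨u1, ui, uc⟩ := u; obtain ⟨t1, ti, tc⟩ := t
  unfold pvLtk at *; dsimp at *; omega

lemma pvLtk_not_trans {u a t : Nat × Int × String}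
    (h1 : ¬ pvLtk u a) (h2 : ¬ pvLtk a t) : ¬ pvLtk u t := by
  obtain ⟨u1, ui, uc⟩ := u; obtain ⟨a1, ai, ac⟩ := a; obtain ⟨t1, ti, tc⟩ := t
  unfold pvLtk at *; dsimp at *; omega

lemma foldl_body_eq_pvStep (eid : String) (l : List (Int × String)) (a : Option (Nat × Int × String)) :
    l.foldl
      (fun best p =>
        match pvRank? eid p.2 with
        | none => best
        | some r =>
          match best with
          | none => some (r, p.1, p.2)
          | some b => if r < b.1 ∨ (r = b.1 ∧ p.1 < b.2.1) then some (r, p.1, p.2) else some b) a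
    = (l.filterMap (fun p => (pvRank? eid p.2).map (fun r => (r, p.1, p.2)))).foldl pvStep a := by
  induction l generalizing a with
  | nil => rfl
  | cons x l ih =>
    simp only [List.foldl_cons, List.filterMap_cons]
    cases hr : pvRank? eid x.2 with
    | none => simp [ih]
    | some r =>
      simp only [Option.map_some, List.foldl_cons]
      rw [ih]
      rcases a with _ | b <;> rfl

lemma pvLtk_irrefl (t : Nat × Int × String) : ¬ pvLtk t t := by
  obtain ⟨t1, ti, tc⟩ := t; unfold pvLtk; dsimp; omega

lemma pvStep_isSome (a : Option (Nat × Int × String)) (x : Nat × Int × String) :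
    ∃ v, pvStep a x = some v := by
  cases a with
  | none => exact ⟨x, rfl⟩
  | some bb =>
    by_cases hc : x.1 < bb.1 ∨ (x.1 = bb.1 ∧ x.2.1 < bb.2.1)
    · exact ⟨x, by simp [pvStep, hc]⟩
    · exact ⟨bb, by simp [pvStep, hc]⟩

lemma pvStep_cases (a : Option (Nat × Int × String)) (x : Nat × Int × String) :
    pvStep a x = some x ∨ (∃ bb, a = some bb ∧ pvStep a x = some bb) := by
  cases a with
  | none => exact Or.inl rfl
  | some bb =>
    by_cases hc : x.1 < bb.1 ∨ (x.1 = bb.1 ∧ x.2.1 < bb.2.1)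
    · exact Or.inl (by simp [pvStep, hc])
    · exact Or.inr ⟨bb, rfl, by simp [pvStep, hc]⟩

lemma pvStep_min (a : Option (Nat × Int × String)) (x v : Nat × Int × String)
    (hv : pvStep a x = some v) :
    ¬ pvLtk x v ∧ (∀ bb, a = some bb → ¬ pvLtk bb v) := by
  cases a with
  | none =>
    have hvx : v = x := by simpa [pvStep] using hv.symm
    subst hvx
    exact ⟨pvLtk_irrefl v, by simp⟩
  | some bb =>
    by_cases hc : x.1 < bb.1 ∨ (x.1 = bb.1 ∧ x.2.1 < bb.2.1)
    · have hvx : v = x := by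
        have := hv
        simp only [pvStep, hc, if_pos] at this
        exact (Option.some_inj.mp this).symm
      subst hvx
      refine ⟨pvLtk_irrefl v, ?_⟩
      rintro bb' hb
      obtain rfl := (Option.some_inj.mp hb).symm
      exact pvLtk_asymm hc
    · have hvb : v = bb := by
        have := hv
        simp only [pvStep, hc, if_false] at this
        exact (Option.some_inj.mp this).symm
      subst hvb
      refine ⟨hc, ?_⟩
      rintro bb' hb
      obtain rfl := (Option.some_inj.mp hb).symm
      exact pvLtk_irrefl _

lemma foldl_pvStep_some (l : List (Nat × Int × String)) (a : Nat × Int × String) :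
    ∃ t, l.foldl pvStep (some a) = some t := by
  induction l generalizing a with
  | nil => exact ⟨a, rfl⟩
  | cons x l ih =>
    simp only [List.foldl_cons]
    obtain ⟨v, hv⟩ := pvStep_isSome (some a) x
    rw [hv]
    exact ih v

lemma foldl_pvStep_mem (l : List (Nat × Int × String)) (a : Option (Nat × Int × String))
    (t : Nat × Int × String) (h : l.foldl pvStep a = some t) : t ∈ a.toList ++ l := by
  induction l generalizing a with
  | nil =>
    simp only [List.foldl_nil] at h
    subst h; simp
  | cons x l ih =>
    simp only [List.foldl_cons] at h
    rcases pvStep_cases a x with h1 | ⟨bb, hab, h1⟩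
    · rw [h1] at h
      have := ih (some x) h
      simp only [Option.toList_some, List.cons_append, List.nil_append, List.mem_cons] at this
      simp only [List.mem_append, List.mem_cons]
      tauto
    · rw [h1] at h
      have := ih (some bb) h
      subst hab
      simp only [Option.toList_some, List.cons_append, List.nil_append, List.mem_cons] at this ⊢
      tauto

lemma foldl_pvStep_min (l : List (Nat × Int × String)) (a : Option (Nat × Int × String))
    (t : Nat × Int × String) (h : l.foldl pvStep a = some t) :
    ∀ u ∈ a.toList ++ l, ¬ pvLtk u t := by
  induction l generalizing a with
  | nil =>
    simp only [List.foldl_nil] at h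
    subst h
    intro u hu
    simp only [List.append_nil, Option.toList_some, List.mem_cons, List.not_mem_nil, or_false] at hu
    exact hu ▸ pvLtk_irrefl t
  | cons x l ih =>
    simp only [List.foldl_cons] at h
    obtain ⟨v, hv⟩ := pvStep_isSome a x
    rw [hv] at h
    have hmin' := ih (some v) h
    have hvt : ¬ pvLtk v t := hmin' v (by simp)
    have hsm := pvStep_min a x v hv
    intro u hu
    simp only [List.mem_append, Option.mem_toList, List.mem_cons] at hu
    rcases hu with hu | hu | hu
    · exact pvLtk_not_trans (hsm.2 u (by rw [hu])) hvt
    · subst hu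
      exact pvLtk_not_trans hsm.1 hvt
    · exact hmin' u (by simp [hu])

lemma foldl_pvStep_none_iff (l : List (Nat × Int × String)) :
    l.foldl pvStep none = none ↔ l = [] := by
  cases l with
  | nil => simp
  | cons x l =>
    simp only [List.foldl_cons]
    have : pvStep none x = some x := rfl
    rw [this]
    obtain ⟨t, ht⟩ := foldl_pvStep_some l x
    simp [ht]

lemma mem_pvCands (eid : String) (cols : List String) (r : Nat) (i : Int) (c : String) :
    (r, i, c) ∈ pvCands eid cols ↔
      ∃ (k : Nat) (_ : k < cols.length), i = (k : Int) ∧ c = cols[k] ∧ pvRank? eid c = some r := by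
  unfold pvCands
  rw [List.mem_filterMap]
  constructor
  · rintro ⟨p, hp, hmap⟩
    rw [PySem.List.mem_enumerate_iff] at hp
    obtain ⟨k, hk, hpk⟩ := hp
    rcases hmr : pvRank? eid p.2 with _ | r'
    · simp [hmr] at hmap
    · rw [hmr] at hmap
      simp only [Option.map_some, Option.some_inj] at hmap
      have h1 : r' = r := congrArg Prod.fst hmap
      have h2 : p.1 = i := congrArg (fun q => q.2.1) hmap
      have h3 : p.2 = c := congrArg (fun q => q.2.2) hmap
      refine ⟨k, hk, ?_, ?_, ?_⟩
      · rw [← h2, hpk]; simp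
      · rw [← h3, hpk]
      · rw [← h3, ← h1, ← hmr]
  · rintro ⟨k, hk, hi, hc, hr⟩
    refine ⟨((k : Int), cols[k]), ?_, ?_⟩
    · rw [PySem.List.mem_enumerate_iff]
      exact ⟨k, hk, by simp⟩
    · simp only [← hc, hr, Option.map_some, Option.some_inj]
      rw [hi]

lemma contains_ofList_iff (cols : List String) (x : String) :
    PySem.Set.contains (PySem.Set.ofList cols) x = true ↔ x ∈ cols := by
  rw [PySem.Set.contains_iff, PySem.Set.mem_ofList]

lemma pvEntityId_ne_ID (e : String) : pvEntityId e ≠ "ID" := by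
  unfold pvEntityId
  intro h
  have hlen := congrArg String.length h
  rw [String.length_append] at hlen
  have h3 : ("_ID" : String).length = 3 := rfl
  have h2 : ("ID" : String).length = 2 := rfl
  rw [h3, h2] at hlen
  omega

-- inversion of pvRank?
lemma pvRank?_inv (eid c : String) (r : Nat) (h : pvRank? eid c = some r) :
    (r = 0 ∧ c = "ID") ∨ (r = 1 ∧ c = eid) ∨
    (∃ j, PySem.List.index? pvPreferred c = some j ∧ r = 2 + j) ∨
    (r = 8 ∧ PySem.Str.endswith c "_ID" = true ∧ c ∉ pvPreferred) := by
  unfold pvRank? at h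
  by_cases h1 : c = "ID"
  · rw [if_pos h1] at h
    exact Or.inl ⟨(Option.some_inj.mp h).symm, h1⟩
  · rw [if_neg h1] at h
    by_cases h2 : c = eid
    · rw [if_pos h2] at h
      exact Or.inr (Or.inl ⟨(Option.some_inj.mp h).symm, h2⟩)
    · rw [if_neg h2] at h
      cases hidx : PySem.List.index? pvPreferred c with
      | some j =>
        rw [hidx] at h
        have h' : (some (2 + j) : Option Nat) = some r := h
        exact Or.inr (Or.inr (Or.inl ⟨j, rfl, (Option.some_inj.mp h').symm⟩))
      | none =>
        rw [hidx] at h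
        cases h3 : PySem.Str.endswith c "_ID" with
        | false =>
          rw [h3] at h
          exact absurd h (by simp)
        | true =>
          rw [h3] at h
          have h' : (some 8 : Option Nat) = some r := h
          exact Or.inr (Or.inr (Or.inr ⟨(Option.some_inj.mp h').symm, rfl,
            (PySem.List.index?_eq_none_iff _ _).mp hidx⟩))

lemma pvRank?_ID (eid : String) : pvRank? eid "ID" = some 0 := by simp [pvRank?]

lemma pvRank?_eid (eid : String) (h : eid ≠ "ID") : pvRank? eid eid = some 1 := by
  simp [pvRank?, h]

lemma pvRank?_pref (eid c : String) (j : Nat) (h0 : c ≠ "ID") (h1 : c ≠ eid)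
    (hidx : PySem.List.index? pvPreferred c = some j) : pvRank? eid c = some (2 + j) := by
  unfold pvRank?
  rw [if_neg h0, if_neg h1, hidx]

lemma pvRank?_suffix (eid c : String) (h0 : c ≠ "ID") (h1 : c ≠ eid)
    (hidx : PySem.List.index? pvPreferred c = none)
    (hs : PySem.Str.endswith c "_ID" = true) : pvRank? eid c = some 8 := by
  unfold pvRank?
  rw [if_neg h0, if_neg h1, hidx, hs]
  rfl

-- B expressed through pvCands
lemma alt_eq_fold (e : String) (cols : List String) :
    best_id_column_py_alt e cols
      = ((pvCands (pvEntityId e) cols).foldl pvStep none).map (fun b => b.2.2) := by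
  simp only [best_id_column_py_alt]
  rw [foldl_body_eq_pvStep]
  rfl

-- the fold's result is a candidate and key-minimal among candidates
lemma fold_res (eid : String) (cols : List String) (t : Nat × Int × String)
    (h : (pvCands eid cols).foldl pvStep none = some t) :
    t ∈ pvCands eid cols ∧ ∀ u ∈ pvCands eid cols, ¬ pvLtk u t := by
  constructor
  · have := foldl_pvStep_mem _ _ _ h
    simpa using this
  · intro u hu
    exact foldl_pvStep_min _ _ _ h u (by simpa using hu)

lemma fold_ne_none_of_mem (eid : String) (cols : List String) (t : Nat × Int × String)
    (ht : t ∈ pvCands eid cols) :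
    ∃ u, (pvCands eid cols).foldl pvStep none = some u := by
  cases hf : (pvCands eid cols).foldl pvStep none with
  | none =>
    rw [foldl_pvStep_none_iff] at hf
    rw [hf] at ht
    cases ht
  | some u => exact ⟨u, rfl⟩

theorem ports_agree (e : String) (cols : List String) :
    best_id_column_py e cols = best_id_column_py_alt e cols := by
  have heidne : pvEntityId e ≠ "ID" := pvEntityId_ne_ID e
  rw [alt_eq_fold]
  simp only [best_id_column_py]
  by_cases hID : "ID" ∈ cols
  · rw [if_pos ((contains_ofList_iff cols "ID").mpr hID)]
    obtain ⟨k, hk, hck⟩ := List.mem_iff_getElem.mp hID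
    have hc0 : ((0 : Nat), ((k : Nat) : Int), "ID") ∈ pvCands (pvEntityId e) cols := by
      rw [mem_pvCands]
      exact ⟨k, hk, rfl, hck.symm, pvRank?_ID _⟩
    obtain ⟨t, ht⟩ := fold_ne_none_of_mem _ _ _ hc0
    obtain ⟨htmem, htmin⟩ := fold_res _ _ _ ht
    have hmin0 := htmin _ hc0
    obtain ⟨r, i, c⟩ := t
    have hr0 : r = 0 := by unfold pvLtk at hmin0; dsimp at hmin0; omega
    subst hr0
    rw [mem_pvCands] at htmem
    obtain ⟨k', hk', hi', hc', hrk⟩ := htmem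
    have hcID : c = "ID" := by
      rcases pvRank?_inv _ _ _ hrk with ⟨_, hcc⟩ | ⟨habs, _⟩ | ⟨j, _, habs⟩ | ⟨habs, _, _⟩
      · exact hcc
      · exact absurd habs (by omega)
      · exact absurd habs (by omega)
      · exact absurd habs (by omega)
    rw [ht, hcID]
    rfl
  · rw [if_neg (fun hcontra => hID ((contains_ofList_iff cols "ID").mp hcontra))]
    by_cases hEID : pvEntityId e ∈ cols
    · rw [if_pos ((contains_ofList_iff cols _).mpr hEID)]
      obtain ⟨k, hk, hck⟩ := List.mem_iff_getElem.mp hEID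
      have hc0 : ((1 : Nat), ((k : Nat) : Int), pvEntityId e) ∈ pvCands (pvEntityId e) cols := by
        rw [mem_pvCands]
        exact ⟨k, hk, rfl, hck.symm, pvRank?_eid _ heidne⟩
      obtain ⟨t, ht⟩ := fold_ne_none_of_mem _ _ _ hc0
      obtain ⟨htmem, htmin⟩ := fold_res _ _ _ ht
      have hmin0 := htmin _ hc0
      obtain ⟨r, i, c⟩ := t
      rw [mem_pvCands] at htmem
      obtain ⟨k', hk', hi', hc', hrk⟩ := htmem
      have hcin : c ∈ cols := hc' ▸ List.getElem_mem hk'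
      have hr1 : r ≤ 1 := by unfold pvLtk at hmin0; dsimp at hmin0; omega
      have hceid : c = pvEntityId e := by
        rcases pvRank?_inv _ _ _ hrk with ⟨_, hcc⟩ | ⟨_, hcc⟩ | ⟨j, _, habs⟩ | ⟨habs, _, _⟩
        · exact absurd (hcc ▸ hcin) hID
        · exact hcc
        · exact absurd habs (by omega)
        · exact absurd habs (by omega)
      rw [ht, hceid]
      rfl
    · rw [if_neg (fun hcontra => hEID ((contains_ofList_iff cols _).mp hcontra))]
      split
      next p hfind =>
        rw [List.find?_eq_some_iff_append] at hfind
        obtain ⟨hpcols, as, bs, hsplit, has⟩ := hfind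
        replace hpcols : p ∈ cols := (contains_ofList_iff _ _).mp hpcols
        have hasnot : ∀ a ∈ as, a ∉ cols := by
          intro a ha hmem
          have hnot := has a ha
          rw [Bool.not_eq_true'] at hnot
          rw [(contains_ofList_iff _ _).mpr hmem] at hnot
          simp at hnot
        have hpnotas : p ∉ as := fun hpa => hasnot p hpa hpcols
        have hidxp : PySem.List.index? pvPreferred p = some as.length :=
          (PySem.List.index?_eq_some_iff _ _ _).mpr ⟨as, bs, hsplit, rfl, hpnotas⟩
        have hpne0 : p ≠ "ID" := fun hh => hID (hh ▸ hpcols)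
        have hpne1 : p ≠ pvEntityId e := fun hh => hEID (hh ▸ hpcols)
        have hrp : pvRank? (pvEntityId e) p = some (2 + as.length) :=
          pvRank?_pref _ _ _ hpne0 hpne1 hidxp
        obtain ⟨k, hk, hck⟩ := List.mem_iff_getElem.mp hpcols
        have hc0 : ((2 + as.length : Nat), ((k : Nat) : Int), p) ∈ pvCands (pvEntityId e) cols := by
          rw [mem_pvCands]; exact ⟨k, hk, rfl, hck.symm, hrp⟩
        obtain ⟨t, ht⟩ := fold_ne_none_of_mem _ _ _ hc0
        obtain ⟨htmem, htmin⟩ := fold_res _ _ _ ht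
        have hmin0 := htmin _ hc0
        obtain ⟨r, i, c⟩ := t
        rw [mem_pvCands] at htmem
        obtain ⟨k', hk', hi', hc', hrk⟩ := htmem
        have hcin : c ∈ cols := hc' ▸ List.getElem_mem hk'
        have haslen : as.length ≤ 5 := by
          have hl := congrArg List.length hsplit
          simp [pvPreferred] at hl
          omega
        have hrle : r ≤ 2 + as.length := by unfold pvLtk at hmin0; dsimp at hmin0; omega
        have hcp : c = p := by
          rcases pvRank?_inv _ _ _ hrk with ⟨_, hcc⟩ | ⟨_, hcc⟩ | ⟨j, hidxc, hrj⟩ | ⟨habs, _, _⟩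
          · exact absurd (hcc ▸ hcin) hID
          · exact absurd (hcc ▸ hcin) hEID
          · obtain ⟨hj, hgetj, _⟩ := PySem.List.getElem_of_index?_eq_some hidxc
            by_cases hlt : j < as.length
            · exfalso
              have hasj : pvPreferred[j]'hj = as[j]'hlt := by
                rw [List.getElem_of_eq hsplit hj, List.getElem_append_left hlt]
              have hcas : c ∈ as := by
                rw [← hgetj, hasj]
                exact List.getElem_mem hlt
              exact hasnot c hcas hcin
            · have heq : j = as.length := by omega
              have hgp : pvPreferred[j]'hj = p := by
                rw [List.getElem_of_eq hsplit hj,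
                  List.getElem_append_right (by omega : as.length ≤ j)]
                simp [heq]
              rw [← hgetj, hgp]
          · exact absurd habs (by omega)
        rw [ht, hcp]
        rfl
      next hfind =>
        have hpref_not : ∀ q ∈ pvPreferred, q ∉ cols := by
          rw [List.find?_eq_none] at hfind
          intro q hq hqc
          exact (hfind q hq) ((contains_ofList_iff _ _).mpr hqc)
        split
        next c0 hfind2 =>
          rw [List.find?_eq_some_iff_append] at hfind2
          obtain ⟨hend0, as0, bs0, hsplit0, has0⟩ := hfind2
          have hc0cols : c0 ∈ cols := by rw [hsplit0]; simp
          have hc0ne0 : c0 ≠ "ID" := fun hh => hID (hh ▸ hc0cols)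
          have hc0ne1 : c0 ≠ pvEntityId e := fun hh => hEID (hh ▸ hc0cols)
          have hc0idx : PySem.List.index? pvPreferred c0 = none :=
            (PySem.List.index?_eq_none_iff _ _).mpr (fun hin => hpref_not c0 hin hc0cols)
          have hrc0 : pvRank? (pvEntityId e) c0 = some 8 :=
            pvRank?_suffix _ _ hc0ne0 hc0ne1 hc0idx hend0
          have hlen0 : as0.length < cols.length := by
            have hl := congrArg List.length hsplit0
            simp at hl
            omega
          have hget0 : cols[as0.length]'hlen0 = c0 := by
            rw [List.getElem_of_eq hsplit0 hlen0,
              List.getElem_append_right (le_refl as0.length)]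
            simp
          have hc0mem : ((8 : Nat), ((as0.length : Nat) : Int), c0) ∈ pvCands (pvEntityId e) cols := by
            rw [mem_pvCands]; exact ⟨as0.length, hlen0, rfl, hget0.symm, hrc0⟩
          obtain ⟨t, ht⟩ := fold_ne_none_of_mem _ _ _ hc0mem
          obtain ⟨htmem, htmin⟩ := fold_res _ _ _ ht
          have hmin0 := htmin _ hc0mem
          obtain ⟨r, i, c⟩ := t
          rw [mem_pvCands] at htmem
          obtain ⟨k', hk', hi', hc', hrk⟩ := htmem
          have hcin : c ∈ cols := hc' ▸ List.getElem_mem hk'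
          have hr8 : r = 8 ∧ PySem.Str.endswith c "_ID" = true := by
            rcases pvRank?_inv _ _ _ hrk with ⟨_, hcc⟩ | ⟨_, hcc⟩ | ⟨j, hidxc, _⟩ | ⟨hr, hend, _⟩
            · exact absurd (hcc ▸ hcin) hID
            · exact absurd (hcc ▸ hcin) hEID
            · exfalso
              have hcp : c ∈ pvPreferred := by
                have hiff := PySem.List.index?_isSome_iff pvPreferred c
                rw [hidxc] at hiff
                exact hiff.mp rfl
              exact hpref_not c hcp hcin
            · exact ⟨hr, hend⟩
          have hile : i ≤ ((as0.length : Nat) : Int) := by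
            obtain ⟨hr, _⟩ := hr8
            subst hr
            unfold pvLtk at hmin0; dsimp at hmin0; omega
          have hk'le : k' ≤ as0.length := by
            rw [hi'] at hile
            exact_mod_cast hile
          have hk'eq : k' = as0.length := by
            by_cases hlt : k' < as0.length
            · exfalso
              have hnot := has0 (as0[k']'hlt) (List.getElem_mem hlt)
              have hceq : c = as0[k']'hlt := by
                rw [hc', List.getElem_of_eq hsplit0 hk', List.getElem_append_left hlt]
              rw [← hceq, Bool.not_eq_true'] at hnot
              rw [hr8.2] at hnot
              simp at hnot
            · omega
          have hcc0 : c = c0 := by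
            rw [hc']
            have : cols[k']'hk' = cols[as0.length]'hlen0 := by
              congr 1
            rw [this, hget0]
          rw [ht, hcc0]
          rfl
        next hfind2 =>
          have hcands : pvCands (pvEntityId e) cols = [] := by
            rw [List.eq_nil_iff_forall_not_mem]
            intro t htc
            obtain ⟨r, i, c⟩ := t
            rw [mem_pvCands] at htc
            obtain ⟨k', hk', hi', hc', hrk⟩ := htc
            have hcin : c ∈ cols := hc' ▸ List.getElem_mem hk'
            rw [List.find?_eq_none] at hfind2
            rcases pvRank?_inv _ _ _ hrk with ⟨_, hcc⟩ | ⟨_, hcc⟩ | ⟨j, hidxc, _⟩ | ⟨_, hend, _⟩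
            · exact hID (hcc ▸ hcin)
            · exact hEID (hcc ▸ hcin)
            · have hcp : c ∈ pvPreferred := by
                have hiff := PySem.List.index?_isSome_iff pvPreferred c
                rw [hidxc] at hiff
                exact hiff.mp rfl
              exact hpref_not c hcp hcin
            · exact (hfind2 c hcin) hend
          rw [hcands]
          rfl

-- ===== VERDICT (by name: the statement is the Claim_ definition above) =====
theorem best_id_column_py_spec : Claim_equal_best_id_column_py := by
  intro e cols _
  exact ports_agree e cols
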